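-- pv_equiv track=rewrite | github.com/sonnyitsunny/Algorithm | 프로그래머스/2/142085. 디펜스 게임/디펜스 게임.py | solution
-- ===== SOURCE A (Python) =====
-- import heapq
--
-- def solution(n, k, enemy):
--     answer = 0
--     combat=[]
--
--
--     for e in enemy:
--         n-=e
--         heapq.heappush(combat,-e)
--
--         if n<0:
--             if k>0:
--                 n+=-heapq.heappop(combat)
--                 k-=1
--                 answer+=1
--
--             else:
--                 break
--         else:
--             answer+=1
--
--     return answer
-- ===== SOURCE B (Python) =====
-- def solution(n, k, enemy):
--     spent = 0
--     alive = []
--     for i, e in enumerate(enemy):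
--         alive.append(e)
--         spent += e
--         if spent > n:
--             if k <= 0:
--                 return i
--             m = max(alive)
--             alive.remove(m)
--             spent -= m
--             k -= 1
--     return len(enemy)
-- ===== Notes on version B (the rewrite author's own statement) =====
-- stated objective: alternative
-- what changed: Replaces A's incrementally maintained negated min-heap and mutating hp counter by a plain list of absorbed enemies with a running damage accumulator, selecting and removing the maximum by an on-demand scan only when a deficit occurs, with early-return control flow instead of a counter plus break.
import Mathlib
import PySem

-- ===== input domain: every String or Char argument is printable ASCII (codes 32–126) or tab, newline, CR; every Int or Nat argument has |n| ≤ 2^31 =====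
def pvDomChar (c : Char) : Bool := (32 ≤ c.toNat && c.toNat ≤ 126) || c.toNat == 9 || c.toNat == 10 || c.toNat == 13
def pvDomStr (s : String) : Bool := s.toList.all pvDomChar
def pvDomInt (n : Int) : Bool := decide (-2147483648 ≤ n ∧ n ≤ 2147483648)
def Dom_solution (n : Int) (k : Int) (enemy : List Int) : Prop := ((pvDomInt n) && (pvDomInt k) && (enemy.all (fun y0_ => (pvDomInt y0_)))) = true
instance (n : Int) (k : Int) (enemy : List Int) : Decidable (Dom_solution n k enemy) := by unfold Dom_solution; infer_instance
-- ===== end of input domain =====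

-- B replaces A's incrementally maintained heap by a plain accumulator of absorbed damage plus an
-- on-demand max-scan at each deficit (selection only when needed); same return value, no mutation issues.

-- ===== PORT A =====
-- A's `combat` is a heapq min-heap of the negated enemies; the port models it as the ascending
-- sorted list of the same values (heappush = ordered insert, heappop = take the head), which is
-- exact for everything A reads from the heap: its multiset of values and the minimum popped.
def solGoA (nA k answer : Int) (combat rest : List Int) : Int :=
  match rest with
  | [] => answer
  | e :: rest' =>
    let nA' := nA - e
    let combat' := List.orderedInsert (· ≤ ·) (-e) combat
    if nA' < 0 then
      if 0 < k then
        match combat' with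
        | m :: cs => solGoA (nA' + (-m)) (k - 1) (answer + 1) cs rest'
        | [] => answer  -- unreachable: combat' contains the element just pushed
      else answer      -- break
    else solGoA nA' k (answer + 1) combat' rest'

def solution (n : Int) (k : Int) (enemy : List Int) : Int :=
  solGoA n k 0 [] enemy

-- ===== PORT B =====
def solGoB (n k spent i : Int) (alive rest : List Int) : Int :=
  match rest with
  | [] => i
  | e :: rest' =>
    let alive' := alive ++ [e]
    let spent' := spent + e
    if n < spent' then
      if k ≤ 0 then i
      else
        match PySem.List.max? alive' (fun x => x) with
        | some m =>
          match PySem.List.remove? alive' m with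
          | some alive'' => solGoB n (k - 1) (spent' - m) (i + 1) alive'' rest'
          | none => i  -- unreachable: m ∈ alive'
        | none => i    -- unreachable: alive' ≠ []
    else solGoB n k spent' (i + 1) alive' rest'

def solution_alt (n : Int) (k : Int) (enemy : List Int) : Int :=
  solGoB n k 0 0 [] enemy

-- ===== PRECONDITION & SPEC =====
def Spec_solution (n : Int) (k : Int) (enemy : List Int) (out : Int) : Prop := out = solution_alt n k enemy
instance (n : Int) (k : Int) (enemy : List Int) (out : Int) : Decidable (Spec_solution n k enemy out) := by unfold Spec_solution; infer_instance

-- ===== CLAIM (what is proved, stated in full; the proofs are below) =====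
def Claim_equal_solution : Prop := ∀ (n : Int) (k : Int) (enemy : List Int), Dom_solution n k enemy → Spec_solution n k enemy (solution n k enemy)

-- ===== LEMMAS AND PROOFS =====

-- Loop invariant: A's heap is (as a multiset) the negation of B's `alive` list, is kept sorted,
-- and A's remaining hp is the initial hp minus B's absorbed total.
theorem go_eq (rest : List Int) : ∀ (combat alive : List Int) (n0 k spent i : Int),
    List.Pairwise (· ≤ ·) combat → combat.Perm (alive.map Neg.neg) →
    solGoA (n0 - spent) k i combat rest = solGoB n0 k spent i alive rest := by
  induction rest with
  | nil => intro _ _ _ _ _ _ _ _; rfl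
  | cons e rest' ih =>
    intro combat alive n0 k spent i hsort hperm
    have hperm' : (List.orderedInsert (· ≤ ·) (-e) combat).Perm ((alive ++ [e]).map Neg.neg) := by
      refine (List.perm_orderedInsert _ _ _).trans ?_
      simp only [List.map_append, List.map_cons, List.map_nil]
      exact ((hperm.cons (-e)).trans (List.perm_append_singleton (-e) _).symm)
    have hsort' : List.Pairwise (· ≤ ·) (List.orderedInsert (· ≤ ·) (-e) combat) :=
      List.Pairwise.orderedInsert (-e) combat hsort
    simp only [solGoA, solGoB]
    have hcond : n0 - spent - e < 0 ↔ n0 < spent + e := by omega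
    by_cases hd : n0 < spent + e
    · rw [if_pos (hcond.mpr hd), if_pos hd]
      by_cases hk : 0 < k
      · rw [if_pos hk, if_neg (by omega : ¬ k ≤ 0)]
        -- the heap just received an element, so it is a cons
        obtain ⟨m0, cs, hc⟩ : ∃ m0 cs, List.orderedInsert (· ≤ ·) (-e) combat = m0 :: cs := by
          cases h : List.orderedInsert (· ≤ ·) (-e) combat with
          | nil => exact absurd (h ▸ (List.perm_orderedInsert _ (-e) combat)).symm (by simp)
          | cons a b => exact ⟨a, b, rfl⟩
        -- B's max of alive' exists and equals -m0
        have hne : alive ++ [e] ≠ [] := by simp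
        obtain ⟨m, hm⟩ : ∃ m, PySem.List.max? (alive ++ [e]) (fun x => x) = some m := by
          cases h : PySem.List.max? (alive ++ [e]) (fun x => x) with
          | none => exact absurd (((PySem.List.max?_eq_none_iff _ _).mp h)) hne
          | some m => exact ⟨m, rfl⟩
        have hmmem : m ∈ alive ++ [e] := PySem.List.max?_mem hm
        have hmmax : ∀ y ∈ alive ++ [e], y ≤ m := by
          intro y hy; exact PySem.List.max?_isMax hm y hy
        have hm0mem : m0 ∈ (alive ++ [e]).map Neg.neg := hperm'.subset (hc ▸ List.mem_cons_self ..)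
        have hnegm_mem : -m ∈ List.orderedInsert (· ≤ ·) (-e) combat :=
          hperm'.mem_iff.mpr (List.mem_map_of_mem hmmem)
        have hm0min : ∀ x ∈ m0 :: cs, m0 ≤ x := by
          intro x hx
          rcases List.mem_cons.mp hx with h | h
          · omega
          · exact (List.pairwise_cons.mp (hc ▸ hsort')).1 x h
        have hm0 : m0 = -m := by
          have h1 : m0 ≤ -m := hm0min _ (hc ▸ hnegm_mem)
          obtain ⟨y, hy, hym⟩ := List.mem_map.mp hm0mem
          have h2 : y ≤ m := hmmax y hy
          omega
        rw [hc, hm]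
        dsimp only
        have hrem : PySem.List.remove? (alive ++ [e]) m = some ((alive ++ [e]).erase m) :=
          PySem.List.remove?_eq_some_erase _ m hmmem
        rw [hrem]
        dsimp only
        have hpermcs : cs.Perm (((alive ++ [e]).erase m).map Neg.neg) := by
          have h1 : ((m0 :: cs).erase m0).Perm (((alive ++ [e]).map Neg.neg).erase m0) :=
            (hc ▸ hperm').erase m0
          rw [List.erase_cons_head] at h1
          rw [List.map_erase neg_injective, ← hm0]
          exact h1
        have hsortcs : List.Pairwise (· ≤ ·) cs := (List.pairwise_cons.mp (hc ▸ hsort')).2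
        have harith : n0 - spent - e + -m0 = n0 - (spent + e - m) := by omega
        rw [harith]
        exact ih cs ((alive ++ [e]).erase m) n0 (k - 1) (spent + e - m) (i + 1) hsortcs hpermcs
      · rw [if_neg hk, if_pos (by omega : k ≤ 0)]
    · rw [if_neg (fun h => hd (hcond.mp h)), if_neg hd]
      have harith : n0 - spent - e = n0 - (spent + e) := by omega
      rw [harith]
      exact ih _ _ n0 k (spent + e) (i + 1) hsort' hperm'

-- ===== VERDICT (by name: the statement is the Claim_ definition above) =====
theorem solution_spec : Claim_equal_solution := by
  intro n k enemy _
  unfold Spec_solution solution solution_alt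
  have h := go_eq enemy [] [] n k 0 0 (by simp) (by simp)
  simpa using h
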